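-- pv_equiv track=rewrite | github.com/Gautardos/downloader | cli/lyrics_fetcher.py | has_synced_lyrics
-- ===== SOURCE A (Python) =====
-- def has_synced_lyrics(lyrics):
--     if not lyrics: return False
--     for line in lyrics.split('\n'):
--         line = line.strip()
--         if line.startswith('[') and ']' in line:
--             content = line.split(']')[0][1:]
--             try:
--                 parts = content.split(':')
--                 if len(parts) >= 2: return True
--             except: continue
--     return False
-- ===== SOURCE B (Python) =====
-- def has_synced_lyrics(lyrics):
--     # Single forward pass over the characters with a tiny line-automaton:
--     # state 0 = at line start (skipping leading whitespace), 1 = inside the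
--     # leading [...] bracket, 2 = line already disqualified; 'colon' records
--     # whether a colon was seen inside the bracket before the bracket closed.
--     if not lyrics:
--         return False
--     state = 0
--     colon = False
--     for ch in lyrics:
--         if ch == '\n':
--             state = 0
--             colon = False
--         elif state == 0:
--             if ch in ' \t\r':
--                 pass
--             elif ch == '[':
--                 state = 1
--                 colon = False
--             else:
--                 state = 2
--         elif state == 1:
--             if ch == ']':
--                 if colon:
--                     return True
--                 state = 2
--             elif ch == ':':
--                 colon = True
--     return False
-- ===== Notes on version B (the rewrite author's own statement) =====
-- stated objective: alternative
-- what changed: Replaced A's per-line strategy (split into lines, strip each, slice out the bracketed prefix and count separator-split parts) by a single forward character scan with a 3-state line automaton (line start / inside bracket / disqualified) plus a colon flag, allocating no intermediate lists or substrings.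
import Mathlib
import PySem

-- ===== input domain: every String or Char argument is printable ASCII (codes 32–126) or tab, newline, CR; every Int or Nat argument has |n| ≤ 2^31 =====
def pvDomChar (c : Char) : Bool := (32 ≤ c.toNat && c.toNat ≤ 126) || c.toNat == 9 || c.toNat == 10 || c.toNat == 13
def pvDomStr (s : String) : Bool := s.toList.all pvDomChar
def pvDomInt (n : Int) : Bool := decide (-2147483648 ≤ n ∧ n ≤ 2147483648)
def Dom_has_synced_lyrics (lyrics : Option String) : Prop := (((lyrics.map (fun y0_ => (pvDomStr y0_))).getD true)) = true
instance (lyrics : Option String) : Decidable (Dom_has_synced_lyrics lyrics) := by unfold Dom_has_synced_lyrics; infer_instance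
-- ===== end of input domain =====

-- B replaces A's per-line split/strip string surgery by one forward character scan
-- with a 3-state line automaton (alternative decomposition, same O(n) cost).

-- ===== PORT A =====
-- per-line body of A's for-loop (the try/except is dead: str.split never raises)
def pvLineCheckA (line : List Char) : Bool :=
  let l := PySem.Chars.strip line
  if PySem.Chars.startswith l ['['] && PySem.Chars.isIn [']'] l then
    -- content = line.split(']')[0][1:]
    let content := PySem.List.slice (PySem.List.pyGetD (PySem.Chars.splitOn l [']']) 0 []) (some 1) none
    -- parts = content.split(':'); len(parts) >= 2
    decide (2 ≤ (PySem.Chars.splitOn content [':']).length)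
  else
    false

def has_synced_lyrics (lyrics : Option String) : Bool :=
  match lyrics with
  | none => false
  | some s =>
    if s.toList.isEmpty then false   -- 'if not lyrics'
    else (PySem.Chars.splitOn s.toList ['\n']).any pvLineCheckA   -- for-loop with early 'return True'

-- ===== PORT B =====
-- states: 0 = at line start skipping whitespace, 1 = inside bracket, 2 = line dead
def pvScanB (st : Nat) (colon : Bool) : List Char → Bool
  | [] => false
  | c :: cs =>
    if c = '\n' then pvScanB 0 false cs
    else if st = 0 then
      if c = ' ' ∨ c = '\t' ∨ c = '\r' then pvScanB 0 colon cs
      else if c = '[' then pvScanB 1 false cs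
      else pvScanB 2 colon cs
    else if st = 1 then
      if c = ']' then (if colon then true else pvScanB 2 colon cs)
      else if c = ':' then pvScanB 1 true cs
      else pvScanB 1 colon cs
    else pvScanB 2 colon cs

def has_synced_lyrics_alt (lyrics : Option String) : Bool :=
  match lyrics with
  | none => false
  | some s =>
    if s.toList.isEmpty then false   -- 'if not lyrics'
    else pvScanB 0 false s.toList

-- ===== PRECONDITION & SPEC =====
def Spec_has_synced_lyrics (lyrics : Option String) (out : Bool) : Prop := out = has_synced_lyrics_alt lyrics
instance (lyrics : Option String) (out : Bool) : Decidable (Spec_has_synced_lyrics lyrics out) := by unfold Spec_has_synced_lyrics; infer_instance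

-- ===== CLAIM (what is proved, stated in full; the proofs are below) =====
def Claim_equal_has_synced_lyrics : Prop := ∀ (lyrics : Option String), Dom_has_synced_lyrics lyrics → Spec_has_synced_lyrics lyrics (has_synced_lyrics lyrics)


-- ===== LEMMAS AND PROOFS =====

def splitChar (d : Char) : List Char → List (List Char)
  | [] => [[]]
  | c :: t => if c = d then [] :: splitChar d t else (splitChar d t).modifyHead (c :: ·)

theorem splitChar_ne_nil (d : Char) (l : List Char) : splitChar d l ≠ [] := by
  induction l with
  | nil => simp [splitChar]
  | cons c t ih =>
    by_cases h : c = d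
    · simp [splitChar, h]
    · simp only [splitChar, if_neg h]
      cases hs : splitChar d t with
      | nil => exact absurd hs ih
      | cons a r => simp

theorem go_eq (d : Char) : ∀ (fuel : Nat) (l cur : List Char) (acc : List (List Char)),
    l.length ≤ fuel →
    PySem.Chars.splitOn.go [d] fuel l cur acc
      = acc.reverse ++ (splitChar d l).modifyHead (cur.reverse ++ ·) := by
  intro fuel
  induction fuel with
  | zero =>
    intro l cur acc h
    have : l = [] := List.length_eq_zero_iff.mp (Nat.le_zero.mp h)
    subst this
    simp [PySem.Chars.splitOn.go, splitChar]
  | succ n ih =>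
    intro l cur acc h
    cases l with
    | nil => simp [PySem.Chars.splitOn.go, splitChar]
    | cons c rest =>
      simp only [PySem.Chars.splitOn.go]
      by_cases hc : c = d
      · subst hc
        simp only [List.isPrefixOf, BEq.rfl, Bool.true_and, if_pos, List.isPrefixOf_nil_left,
          List.length_cons, List.length_nil, Nat.zero_add, List.drop_succ_cons, List.drop_zero]
        rw [ih rest [] (cur.reverse :: acc) (Nat.le_of_succ_le_succ (by simpa using h))]
        cases hs : splitChar c rest with
        | nil => exact absurd hs (splitChar_ne_nil c rest)
        | cons a r => simp [splitChar, hs]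
      · have hpre : [d].isPrefixOf (c :: rest) = false := by
          simp [List.isPrefixOf]
          exact fun hx => absurd hx.symm hc
        simp only [hpre, Bool.false_eq_true, if_false]
        rw [ih rest (c :: cur) acc (Nat.le_of_succ_le_succ (by simpa using h))]
        simp only [splitChar, if_neg hc]
        cases hs : splitChar d rest with
        | nil => exact absurd hs (splitChar_ne_nil d rest)
        | cons a r => simp

theorem splitOn_eq_splitChar (d : Char) (s : List Char) :
    PySem.Chars.splitOn s [d] = splitChar d s := by
  unfold PySem.Chars.splitOn
  rw [go_eq d (s.length + 1) s [] [] (Nat.le_succ _)]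
  cases hs : splitChar d s with
  | nil => exact absurd hs (splitChar_ne_nil d s)
  | cons a r => simp

theorem length_splitChar (d : Char) (l : List Char) :
    (splitChar d l).length = l.count d + 1 := by
  induction l with
  | nil => simp [splitChar]
  | cons c t ih =>
    by_cases h : c = d
    · subst h; simp [splitChar, ih, List.count_cons]
    · simp [splitChar, h, List.length_modifyHead, ih, List.count_cons, Ne.symm h]

theorem head?_splitChar (d : Char) (l : List Char) :
    (splitChar d l).head? = some (l.takeWhile (· ≠ d)) := by
  induction l with
  | nil => simp [splitChar]
  | cons c t ih =>
    by_cases h : c = d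
    · subst h; simp [splitChar, List.takeWhile_cons]
    · cases hs : splitChar d t with
      | nil => exact absurd hs (splitChar_ne_nil d t)
      | cons a r =>
        rw [hs] at ih
        simp only [List.head?_cons, Option.some.injEq] at ih
        simp [splitChar, h, hs, List.takeWhile_cons, ih]

theorem tail_splitChar (d : Char) (l : List Char) :
    (splitChar d l).tail
      = if d ∈ l then splitChar d ((l.dropWhile (· ≠ d)).tail) else [] := by
  induction l with
  | nil => simp [splitChar]
  | cons c t ih =>
    by_cases h : c = d
    · subst h; simp [splitChar, List.dropWhile_cons]
    · cases hs : splitChar d t with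
      | nil => exact absurd hs (splitChar_ne_nil d t)
      | cons a r =>
        rw [hs] at ih
        simp only [List.tail_cons] at ih
        simp [splitChar, h, hs, List.dropWhile_cons, Ne.symm h, ih, List.mem_cons]

theorem any_splitChar (d : Char) (s : List Char) (h : List Char → Bool) :
    (splitChar d s).any h
      = (h (s.takeWhile (· ≠ d))
          || if d ∈ s then (splitChar d ((s.dropWhile (· ≠ d)).tail)).any h else false) := by
  cases hs : splitChar d s with
  | nil => exact absurd hs (splitChar_ne_nil d s)
  | cons a r =>
    have h1 := head?_splitChar d s
    have h2 := tail_splitChar d s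
    rw [hs] at h1 h2
    simp only [List.head?_cons, Option.some.injEq] at h1
    simp only [List.tail_cons] at h2
    subst h1
    rw [List.any_cons, h2]
    by_cases hd : d ∈ s <;> simp [hd]

theorem mem_splitChar_mem (d : Char) (s line : List Char) (hline : line ∈ splitChar d s) :
    ∀ x ∈ line, x ∈ s ∧ x ≠ d := by
  induction s generalizing line with
  | nil =>
    simp [splitChar] at hline
    subst hline; simp
  | cons c t ih =>
    by_cases h : c = d
    · subst h
      rw [splitChar, if_pos rfl] at hline
      rcases List.mem_cons.mp hline with h1 | h1
      · subst h1; simp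
      · intro x hx
        have := ih line h1 x hx
        exact ⟨List.mem_cons_of_mem _ this.1, this.2⟩
    · cases hs : splitChar d t with
      | nil => exact absurd hs (splitChar_ne_nil d t)
      | cons a r =>
        rw [splitChar, if_neg h, hs] at hline
        simp only [List.modifyHead_cons, List.mem_cons] at hline
        rcases hline with h1 | h1
        · subst h1
          intro x hx
          rcases List.mem_cons.mp hx with h2 | h2
          · subst h2; exact ⟨List.mem_cons_self, h⟩
          · have := ih a (by rw [hs]; exact List.mem_cons_self) x h2
            exact ⟨List.mem_cons_of_mem _ this.1, this.2⟩
        · intro x hx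
          have := ih line (by rw [hs]; exact List.mem_cons_of_mem _ h1) x hx
          exact ⟨List.mem_cons_of_mem _ this.1, this.2⟩

def afterNl (s : List Char) : List Char := (s.dropWhile (· ≠ '\n')).tail

def inBr (b : Bool) : List Char → Bool
  | [] => false
  | c :: cs => if c = ']' then b else if c = ':' then inBr true cs else inBr b cs

def hitRef : List Char → Bool
  | [] => false
  | c :: cs =>
    if c = ' ' ∨ c = '\t' ∨ c = '\r' then hitRef cs
    else if c = '[' then inBr false cs else false

theorem scan2_eq (s : List Char) (colon : Bool) :
    pvScanB 2 colon s = pvScanB 0 false (afterNl s) := by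
  induction s generalizing colon with
  | nil => simp [pvScanB, afterNl]
  | cons c cs ih =>
    by_cases h : c = '\n'
    · subst h; simp [pvScanB, afterNl, List.dropWhile_cons]
    · simp [pvScanB, h, afterNl, List.dropWhile_cons, ih]

theorem scan1_eq (s : List Char) (colon : Bool) :
    pvScanB 1 colon s
      = (inBr colon (s.takeWhile (· ≠ '\n')) || pvScanB 0 false (afterNl s)) := by
  induction s generalizing colon with
  | nil => simp [pvScanB, afterNl, inBr]
  | cons c cs ih =>
    by_cases h : c = '\n'
    · subst h; simp [pvScanB, afterNl, List.dropWhile_cons, List.takeWhile_cons, inBr]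
    · by_cases h1 : c = ']'
      · subst h1
        by_cases hb : colon <;>
          simp [pvScanB, afterNl, List.dropWhile_cons, List.takeWhile_cons, inBr, hb,
            scan2_eq]
      · by_cases h2 : c = ':'
        · subst h2
          simp [pvScanB, afterNl, List.dropWhile_cons, List.takeWhile_cons, inBr, ih]
        · simp [pvScanB, h, h1, h2, afterNl, List.dropWhile_cons, List.takeWhile_cons, inBr, ih]

theorem scan0_eq (s : List Char) :
    pvScanB 0 false s
      = (hitRef (s.takeWhile (· ≠ '\n')) || pvScanB 0 false (afterNl s)) := by
  induction s with
  | nil => simp [pvScanB, afterNl, hitRef]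
  | cons c cs ih =>
    by_cases h : c = '\n'
    · subst h; simp [pvScanB, afterNl, List.dropWhile_cons, List.takeWhile_cons, hitRef]
    · by_cases hw : c = ' ' ∨ c = '\t' ∨ c = '\r'
      · have hn : ¬ c = '\n' := h
        simp [pvScanB, hw, hn, afterNl, List.dropWhile_cons, List.takeWhile_cons, hitRef, ih]
      · by_cases hb : c = '['
        · subst hb
          simp [pvScanB, afterNl, List.dropWhile_cons, List.takeWhile_cons, hitRef, scan1_eq]
        · simp [pvScanB, h, hw, hb, afterNl, List.dropWhile_cons, List.takeWhile_cons, hitRef,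
            scan2_eq]

theorem scan_eq_any (s : List Char) :
    pvScanB 0 false s = (splitChar '\n' s).any hitRef := by
  by_cases hmem : '\n' ∈ s
  · have hdw : s.dropWhile (· ≠ '\n') ≠ [] := by
      intro hnil
      have := List.dropWhile_eq_nil_iff.mp hnil
      simpa using this '\n' hmem
    have hlen : (afterNl s).length < s.length := by
      have h1 : (s.dropWhile (· ≠ '\n')).length ≤ s.length := List.length_dropWhile_le _ _
      have h2 : 0 < (s.dropWhile (· ≠ '\n')).length := List.length_pos_iff.mpr hdw
      simp only [afterNl, List.length_tail]
      omega
    rw [scan0_eq, any_splitChar '\n' s hitRef, if_pos hmem,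
      scan_eq_any (afterNl s)]
    rfl
  · have ht : s.takeWhile (· ≠ '\n') = s :=
      List.takeWhile_eq_self_iff.mpr (fun x hx => by simp; intro he; exact hmem (he ▸ hx))
    have hd : s.dropWhile (· ≠ '\n') = [] :=
      List.dropWhile_eq_nil_iff.mpr (fun x hx => by simp; intro he; exact hmem (he ▸ hx))
    have ha : afterNl s = [] := by unfold afterNl; rw [hd]; rfl
    rw [scan0_eq, any_splitChar '\n' s hitRef, if_neg hmem, ht, ha]
    simp [pvScanB]
termination_by s.length
decreasing_by exact hlen

theorem char_eq_of_toNat (a b : Char) (h : a.toNat = b.toNat) : a = b := by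
  cases a; cases b; simp [Char.toNat] at h ⊢; exact UInt32.toNat_inj.mp h

theorem ws_char (c : Char) (hd : pvDomChar c = true) (hn : c ≠ '\n') :
    PySem.Chars.isspace c = (decide (c = ' ') || decide (c = '\t') || decide (c = '\r')) := by
  have h10 : c.toNat ≠ 10 := fun h => hn (char_eq_of_toNat c '\n' h)
  simp only [pvDomChar, Bool.or_eq_true, Bool.and_eq_true, decide_eq_true_eq, beq_iff_eq] at hd
  by_cases hsp : c = ' '
  · subst hsp; decide
  by_cases hta : c = '\t'
  · subst hta; decide
  by_cases hcr : c = '\r'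
  · subst hcr; decide
  have h32 : c.toNat ≠ 32 := fun h => hsp (char_eq_of_toNat c ' ' h)
  have h9 : c.toNat ≠ 9 := fun h => hta (char_eq_of_toNat c '\t' h)
  have h13 : c.toNat ≠ 13 := fun h => hcr (char_eq_of_toNat c '\r' h)
  simp only [hsp, hta, hcr, decide_false, Bool.or_false]
  simp only [PySem.Chars.isspace]
  simp only [Bool.or_eq_false_iff, Bool.and_eq_false_iff, decide_eq_false_iff_not]
  omega

theorem inBr_eq (b : Bool) (t : List Char) :
    inBr b t = (decide (']' ∈ t) && (b || decide (':' ∈ t.takeWhile (· ≠ ']')))) := by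
  induction t generalizing b with
  | nil => simp [inBr]
  | cons c cs ih =>
    by_cases h1 : c = ']'
    · subst h1; simp [inBr, List.takeWhile_cons]
    · by_cases h2 : c = ':'
      · subst h2; simp [inBr, List.takeWhile_cons, ih, Ne.symm h1]
      · simp [inBr, h1, h2, List.takeWhile_cons, ih, Ne.symm h1, Ne.symm h2]

theorem rstrip_cons_not_space (c : Char) (t : List Char) (h : PySem.Chars.isspace c = false) :
    PySem.Chars.rstrip (c :: t) = c :: PySem.Chars.rstrip t := by
  unfold PySem.Chars.rstrip
  rw [List.reverse_cons, List.dropWhile_append]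
  by_cases he : (List.dropWhile PySem.Chars.isspace t.reverse).isEmpty
  · simp only [he, if_pos]
    simp only [List.dropWhile_cons, h, List.dropWhile_nil, Bool.false_eq_true, if_false]
    rw [List.isEmpty_iff] at he
    simp [he]
  · simp [he]

theorem rstrip_decomp (t : List Char) :
    ∃ w, t = PySem.Chars.rstrip t ++ w ∧ ∀ x ∈ w, PySem.Chars.isspace x = true := by
  refine ⟨(t.reverse.takeWhile PySem.Chars.isspace).reverse, ?_, ?_⟩
  · conv_lhs => rw [← List.reverse_reverse t, ← List.takeWhile_append_dropWhile
      (p := PySem.Chars.isspace) (l := t.reverse)]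
    rw [List.reverse_append]
    rfl
  · intro x hx
    rw [List.mem_reverse] at hx
    exact List.mem_takeWhile_imp hx

theorem mem_rstrip_iff (x : Char) (t : List Char) (hx : PySem.Chars.isspace x = false) :
    x ∈ PySem.Chars.rstrip t ↔ x ∈ t := by
  obtain ⟨w, hw, hws⟩ := rstrip_decomp t
  constructor
  · intro h; rw [hw]; exact List.mem_append_left _ h
  · intro h
    rw [hw] at h
    rcases List.mem_append.mp h with h1 | h1
    · exact h1
    · exact absurd (hws x h1) (by simp [hx])

theorem takeWhile_ne_append (d : Char) (a w : List Char) (h : d ∈ a) :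
    List.takeWhile (· ≠ d) (a ++ w) = List.takeWhile (· ≠ d) a := by
  induction a with
  | nil => exact absurd h (List.not_mem_nil)
  | cons c a' ih =>
    by_cases hc : c = d
    · subst hc; simp [List.takeWhile_cons]
    · have : d ∈ a' := by
        rcases List.mem_cons.mp h with h1 | h1
        · exact absurd h1.symm hc
        · exact h1
      simp [List.takeWhile_cons, hc]
      simpa using ih this

theorem takeWhile_rstrip (d : Char) (t : List Char) (hd : PySem.Chars.isspace d = false)
    (h : d ∈ t) :
    List.takeWhile (· ≠ d) (PySem.Chars.rstrip t) = List.takeWhile (· ≠ d) t := by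
  obtain ⟨w, hw, hws⟩ := rstrip_decomp t
  have hm : d ∈ PySem.Chars.rstrip t := (mem_rstrip_iff d t hd).mpr h
  conv_rhs => rw [hw]
  rw [takeWhile_ne_append d _ w hm]

theorem lineA_eq_hitRef : ∀ (line : List Char),
    (∀ x ∈ line, pvDomChar x = true ∧ x ≠ '\n') → pvLineCheckA line = hitRef line := by
  intro line
  induction line with
  | nil => intro _; decide
  | cons c cs ih =>
    intro hd
    have hdc := hd c List.mem_cons_self
    by_cases hsp : PySem.Chars.isspace c = true
    · have hws : c = ' ' ∨ c = '\t' ∨ c = '\r' := by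
        have := ws_char c hdc.1 hdc.2
        rw [hsp] at this
        rcases Bool.or_eq_true_iff.mp this.symm with h | h
        · rcases Bool.or_eq_true_iff.mp h with h1 | h1
          · exact Or.inl (of_decide_eq_true h1)
          · exact Or.inr (Or.inl (of_decide_eq_true h1))
        · exact Or.inr (Or.inr (of_decide_eq_true h))
      have hstrip : PySem.Chars.strip (c :: cs) = PySem.Chars.strip cs := by
        unfold PySem.Chars.strip PySem.Chars.lstrip
        simp [hsp]
      have h1 : pvLineCheckA (c :: cs) = pvLineCheckA cs := by
        simp only [pvLineCheckA, hstrip]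
      rw [h1, ih (fun x hx => hd x (List.mem_cons_of_mem _ hx))]
      show _ = hitRef (c :: cs)
      rw [hitRef, if_pos hws]
    · have hsp' : PySem.Chars.isspace c = false := Bool.eq_false_iff.mpr hsp
      have hnws : ¬(c = ' ' ∨ c = '\t' ∨ c = '\r') := by
        rintro (h | h | h) <;> subst h <;> exact absurd hsp' (by decide)
      have hlstrip : PySem.Chars.lstrip (c :: cs) = c :: cs := by
        unfold PySem.Chars.lstrip
        simp [hsp']
      have hstrip : PySem.Chars.strip (c :: cs) = c :: PySem.Chars.rstrip cs := by
        unfold PySem.Chars.strip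
        rw [hlstrip, rstrip_cons_not_space c cs hsp']
      by_cases hbr : c = '['
      · subst hbr
        have hR : hitRef ('[' :: cs) = inBr false cs := by
          rw [hitRef, if_neg hnws, if_pos rfl]
        rw [hR, inBr_eq]
        simp only [pvLineCheckA, hstrip]
        by_cases hmem : ']' ∈ cs
        · have hmr : ']' ∈ PySem.Chars.rstrip cs := (mem_rstrip_iff ']' cs (by decide)).mpr hmem
          have hIn : PySem.Chars.isIn [']'] ('[' :: PySem.Chars.rstrip cs) = true := by
            rw [PySem.Chars.isIn_iff_infix, List.singleton_infix_iff]
            exact List.mem_cons_of_mem _ hmr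
          have hstart : PySem.Chars.startswith ('[' :: PySem.Chars.rstrip cs) ['['] = true := by
            simp [PySem.Chars.startswith, List.isPrefixOf]
          rw [hstart, hIn]
          simp only [Bool.and_self, if_pos]
          cases hsc : splitChar ']' (PySem.Chars.rstrip cs) with
          | nil => exact absurd hsc (splitChar_ne_nil _ _)
          | cons a r =>
            have ha : a = List.takeWhile (· ≠ ']') (PySem.Chars.rstrip cs) := by
              have := head?_splitChar ']' (PySem.Chars.rstrip cs)
              rw [hsc] at this
              simpa using this
            have hsplit2 : PySem.Chars.splitOn ('[' :: PySem.Chars.rstrip cs) [']']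
                = ('[' :: a) :: r := by
              rw [splitOn_eq_splitChar, splitChar, if_neg (by decide), hsc]
              rfl
            rw [hsplit2, PySem.List.pyGetD_zero_cons, PySem.List.slice_from_one]
            simp only [List.tail_cons]
            rw [ha, takeWhile_rstrip ']' cs (by decide) hmem]
            simp only [splitOn_eq_splitChar, length_splitChar]
            simp only [hmem, decide_true, Bool.true_and, Bool.false_or]
            rw [decide_eq_decide.mpr]
            constructor
            · intro h2
              have : 0 < (List.takeWhile (· ≠ ']') cs).count ':' := by omega
              exact List.count_pos_iff.mp this
            · intro hmem2
              have := List.count_pos_iff.mpr hmem2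
              omega
        · have hIn : PySem.Chars.isIn [']'] ('[' :: PySem.Chars.rstrip cs) = false := by
            rw [← Bool.not_eq_true, PySem.Chars.isIn_iff_infix, List.singleton_infix_iff]
            intro hmm
            rcases List.mem_cons.mp hmm with h1 | h1
            · exact absurd h1 (by decide)
            · exact hmem ((mem_rstrip_iff ']' cs (by decide)).mp h1)
          rw [hIn]
          simp [hmem]
      · have hstart : PySem.Chars.startswith (c :: PySem.Chars.rstrip cs) ['['] = false := by
          simp [PySem.Chars.startswith, List.isPrefixOf]
          exact fun h => absurd h.symm hbr
        simp only [pvLineCheckA, hstrip]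
        rw [hstart]
        rw [hitRef, if_neg hnws, if_neg hbr]
        rfl

theorem any_congr' (f g : List Char → Bool) (l : List (List Char))
    (h : ∀ x ∈ l, f x = g x) : l.any f = l.any g := by
  induction l with
  | nil => rfl
  | cons a r ih =>
    simp [List.any_cons, h a List.mem_cons_self, ih (fun x hx => h x (List.mem_cons_of_mem _ hx))]

-- ===== VERDICT (by name: the statement is the Claim_ definition above) =====
theorem has_synced_lyrics_spec : Claim_equal_has_synced_lyrics := by
  intro lyrics hdom
  unfold Spec_has_synced_lyrics
  cases lyrics with
  | none => rfl
  | some s =>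
    unfold has_synced_lyrics has_synced_lyrics_alt
    by_cases he : s.toList.isEmpty
    · simp [he]
    · simp only [he, Bool.false_eq_true, if_false]
      rw [splitOn_eq_splitChar, scan_eq_any]
      apply any_congr'
      intro line hline
      apply lineA_eq_hitRef
      intro x hx
      have hmem := mem_splitChar_mem '\n' s.toList line hline x hx
      have hps : pvDomStr s = true := hdom
      have hdomx : pvDomChar x = true := by
        unfold pvDomStr at hps
        exact List.all_eq_true.mp hps x hmem.1
      exact ⟨hdomx, hmem.2⟩
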